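-- pv_equiv track=rewrite | github.com/LamiKols/Deciframe | ai/routes.py | generate_fallback_variants
-- ===== SOURCE A (Python) =====
-- def generate_fallback_variants(problem_description):
--     """Generate intelligent fallback variants when OpenAI is unavailable"""
--     base_problem = problem_description.strip()
--
--     # Analyze problem type based on keywords
--     technical_keywords = ['system', 'software', 'database', 'api', 'integration', 'performance', 'bug', 'error']
--     business_keywords = ['cost', 'revenue', 'profit', 'efficiency', 'process', 'workflow', 'customer', 'sales']
--     user_keywords = ['user', 'interface', 'experience', 'usability', 'access', 'navigation', 'design']
--
--     problem_lower = base_problem.lower()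
--
--     variants = []
--
--     # Technical-focused variant
--     if any(keyword in problem_lower for keyword in technical_keywords):
--         variants.append({
--             "title": "Technical System Optimization",
--             "description": f"Address the underlying technical challenges in {base_problem.lower()} by implementing systematic improvements to infrastructure, data processing, and system integration capabilities."
--         })
--     else:
--         variants.append({
--             "title": "Technology Infrastructure Enhancement",
--             "description": f"Develop technical solutions to resolve {base_problem.lower()} through improved system architecture, automated processes, and enhanced data management capabilities."
--         })
--
--     # Business-focused variant
--     if any(keyword in problem_lower for keyword in business_keywords):
--         variants.append({
--             "title": "Business Process Improvement",
--             "description": f"Optimize organizational efficiency by addressing {base_problem.lower()} through streamlined workflows, cost reduction strategies, and enhanced operational procedures."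
--         })
--     else:
--         variants.append({
--             "title": "Strategic Business Enhancement",
--             "description": f"Improve business outcomes by systematically resolving {base_problem.lower()} to increase productivity, reduce operational overhead, and enhance competitive positioning."
--         })
--
--     # User experience variant
--     if any(keyword in problem_lower for keyword in user_keywords):
--         variants.append({
--             "title": "User Experience Optimization",
--             "description": f"Enhance user satisfaction and engagement by addressing {base_problem.lower()} through improved interface design, simplified workflows, and better accessibility features."
--         })
--     else:
--         variants.append({
--             "title": "Stakeholder Experience Enhancement",
--             "description": f"Improve stakeholder interactions and satisfaction by resolving {base_problem.lower()} through better communication tools, streamlined processes, and enhanced service delivery."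
--         })
--
--     return variants
-- ===== SOURCE B (Python) =====
-- def generate_fallback_variants(problem_description):
--     """Generate intelligent fallback variants when OpenAI is unavailable.
--
--     Single left-to-right scan over the lowered text: at each position we test
--     which keyword group has a keyword starting exactly there (prefix test),
--     instead of running one full substring search per keyword.  The three
--     variants are then assembled from a template table using the three flags.
--     """
--     low = problem_description.strip().lower()
--     TECH = ('system', 'software', 'database', 'api', 'integration', 'performance', 'bug', 'error')
--     BIZ = ('cost', 'revenue', 'profit', 'efficiency', 'process', 'workflow', 'customer', 'sales')
--     USR = ('user', 'interface', 'experience', 'usability', 'access', 'navigation', 'design')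
--     t = b = u = False
--     for i in range(len(low)):
--         t = t or any(low.startswith(kw, i) for kw in TECH)
--         b = b or any(low.startswith(kw, i) for kw in BIZ)
--         u = u or any(low.startswith(kw, i) for kw in USR)
--     forms = [
--         (t,
--          ("Technical System Optimization",
--           "Address the underlying technical challenges in ",
--           " by implementing systematic improvements to infrastructure, data processing, and system integration capabilities."),
--          ("Technology Infrastructure Enhancement",
--           "Develop technical solutions to resolve ",
--           " through improved system architecture, automated processes, and enhanced data management capabilities.")),
--         (b,
--          ("Business Process Improvement",
--           "Optimize organizational efficiency by addressing ",
--           " through streamlined workflows, cost reduction strategies, and enhanced operational procedures."),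
--          ("Strategic Business Enhancement",
--           "Improve business outcomes by systematically resolving ",
--           " to increase productivity, reduce operational overhead, and enhance competitive positioning.")),
--         (u,
--          ("User Experience Optimization",
--           "Enhance user satisfaction and engagement by addressing ",
--           " through improved interface design, simplified workflows, and better accessibility features."),
--          ("Stakeholder Experience Enhancement",
--           "Improve stakeholder interactions and satisfaction by resolving ",
--           " through better communication tools, streamlined processes, and enhanced service delivery.")),
--     ]
--     out = []
--     for flag, match, nomatch in forms:
--         title, pre, post = match if flag else nomatch
--         out.append({"title": title, "description": pre + low + post})
--     return out
-- ===== Notes on version B (the rewrite author's own statement) =====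
-- stated objective: alternative
-- what changed: Replaces A's three per-keyword substring searches ('kw in low' for each of 23 keywords) by a single left-to-right scan of the text that tests at each position which keyword group starts there, and assembles the variants from a template table instead of three unrolled if/else blocks.
import Mathlib
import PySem

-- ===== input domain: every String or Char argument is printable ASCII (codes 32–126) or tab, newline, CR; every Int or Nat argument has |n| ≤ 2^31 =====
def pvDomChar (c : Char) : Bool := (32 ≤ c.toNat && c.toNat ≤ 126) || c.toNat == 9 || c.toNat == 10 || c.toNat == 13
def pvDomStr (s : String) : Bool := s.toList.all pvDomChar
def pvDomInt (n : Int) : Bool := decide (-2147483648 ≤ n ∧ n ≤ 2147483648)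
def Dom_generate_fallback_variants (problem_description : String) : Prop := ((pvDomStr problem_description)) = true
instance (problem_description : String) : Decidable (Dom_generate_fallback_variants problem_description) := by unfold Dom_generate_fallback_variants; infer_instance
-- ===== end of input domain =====

-- B replaces A's three per-keyword substring searches by ONE left-to-right scan of the
-- text that tests, at each position, which keyword group starts there (prefix tests),
-- and assembles the three variants from a template table (objective: alternative).

-- ===== PORT A =====
def generate_fallback_variants (problem_description : String) : List (List (String × String)) :=
  let base_problem := PySem.Str.strip problem_description
  let technical_keywords := ["system", "software", "database", "api", "integration", "performance", "bug", "error"]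
  let business_keywords := ["cost", "revenue", "profit", "efficiency", "process", "workflow", "customer", "sales"]
  let user_keywords := ["user", "interface", "experience", "usability", "access", "navigation", "design"]
  let problem_lower := PySem.Str.lower base_problem
  let variants : List (List (String × String)) := []
  -- Technical-focused variant
  let variants := variants ++
    [if technical_keywords.any (fun keyword => PySem.Str.isIn keyword problem_lower) then
      [("title", "Technical System Optimization"),
       ("description", "Address the underlying technical challenges in " ++ PySem.Str.lower base_problem ++ " by implementing systematic improvements to infrastructure, data processing, and system integration capabilities.")]
    else
      [("title", "Technology Infrastructure Enhancement"),
       ("description", "Develop technical solutions to resolve " ++ PySem.Str.lower base_problem ++ " through improved system architecture, automated processes, and enhanced data management capabilities.")]]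
  -- Business-focused variant
  let variants := variants ++
    [if business_keywords.any (fun keyword => PySem.Str.isIn keyword problem_lower) then
      [("title", "Business Process Improvement"),
       ("description", "Optimize organizational efficiency by addressing " ++ PySem.Str.lower base_problem ++ " through streamlined workflows, cost reduction strategies, and enhanced operational procedures.")]
    else
      [("title", "Strategic Business Enhancement"),
       ("description", "Improve business outcomes by systematically resolving " ++ PySem.Str.lower base_problem ++ " to increase productivity, reduce operational overhead, and enhance competitive positioning.")]]
  -- User experience variant
  let variants := variants ++
    [if user_keywords.any (fun keyword => PySem.Str.isIn keyword problem_lower) then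
      [("title", "User Experience Optimization"),
       ("description", "Enhance user satisfaction and engagement by addressing " ++ PySem.Str.lower base_problem ++ " through improved interface design, simplified workflows, and better accessibility features.")]
    else
      [("title", "Stakeholder Experience Enhancement"),
       ("description", "Improve stakeholder interactions and satisfaction by resolving " ++ PySem.Str.lower base_problem ++ " through better communication tools, streamlined processes, and enhanced service delivery.")]]
  variants

-- ===== PORT B =====
-- low.startswith(kw, i) with 0 ≤ i is exactly a prefix test on the i-th suffix:
-- PySem.Chars.startswith ((low.toList).drop i) kw.toList (exact on that range).
def pvStartsGroup (low : List Char) (i : Nat) (kws : List String) : Bool :=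
  kws.any (fun kw => PySem.Chars.startswith (low.drop i) kw.toList)

def generate_fallback_variants_alt (problem_description : String) : List (List (String × String)) :=
  let low := PySem.Str.lower (PySem.Str.strip problem_description)
  let tech := ["system", "software", "database", "api", "integration", "performance", "bug", "error"]
  let biz := ["cost", "revenue", "profit", "efficiency", "process", "workflow", "customer", "sales"]
  let usr := ["user", "interface", "experience", "usability", "access", "navigation", "design"]
  -- for i in range(len(low)): t = t or any(...); b = b or any(...); u = u or any(...)
  let flags := (List.range low.toList.length).foldl
    (fun (s : Bool × Bool × Bool) i =>
      (s.1 || pvStartsGroup low.toList i tech,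
       s.2.1 || pvStartsGroup low.toList i biz,
       s.2.2 || pvStartsGroup low.toList i usr))
    (false, false, false)
  let forms : List (Bool × (String × String × String) × (String × String × String)) :=
    [(flags.1,
      ("Technical System Optimization",
       "Address the underlying technical challenges in ",
       " by implementing systematic improvements to infrastructure, data processing, and system integration capabilities."),
      ("Technology Infrastructure Enhancement",
       "Develop technical solutions to resolve ",
       " through improved system architecture, automated processes, and enhanced data management capabilities.")),
     (flags.2.1,
      ("Business Process Improvement",
       "Optimize organizational efficiency by addressing ",
       " through streamlined workflows, cost reduction strategies, and enhanced operational procedures."),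
      ("Strategic Business Enhancement",
       "Improve business outcomes by systematically resolving ",
       " to increase productivity, reduce operational overhead, and enhance competitive positioning.")),
     (flags.2.2,
      ("User Experience Optimization",
       "Enhance user satisfaction and engagement by addressing ",
       " through improved interface design, simplified workflows, and better accessibility features."),
      ("Stakeholder Experience Enhancement",
       "Improve stakeholder interactions and satisfaction by resolving ",
       " through better communication tools, streamlined processes, and enhanced service delivery."))]
  forms.map (fun e =>
    let p := if e.1 then e.2.1 else e.2.2
    [("title", p.1), ("description", p.2.1 ++ low ++ p.2.2)])

-- ===== PRECONDITION & SPEC =====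
def Spec_generate_fallback_variants (problem_description : String) (out : List (List (String × String))) : Prop := out = generate_fallback_variants_alt problem_description
instance (problem_description : String) (out : List (List (String × String))) : Decidable (Spec_generate_fallback_variants problem_description out) := by unfold Spec_generate_fallback_variants; infer_instance

-- ===== CLAIM =====
def Claim_equal_generate_fallback_variants : Prop := ∀ (problem_description : String), Dom_generate_fallback_variants problem_description → Spec_generate_fallback_variants problem_description (generate_fallback_variants problem_description)

-- ===== LEMMAS AND PROOFS =====

-- the triple-of-ORs fold computes the three 'any' flags componentwise
lemma pv_foldl_or3 (l : List Nat) (p q r : Nat → Bool) (a b c : Bool) :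
    l.foldl (fun (s : Bool × Bool × Bool) i => (s.1 || p i, s.2.1 || q i, s.2.2 || r i)) (a, b, c)
      = (a || l.any p, b || l.any q, c || l.any r) := by
  induction l generalizing a b c with
  | nil => simp
  | cons x xs ih => simp [List.foldl_cons, ih, Bool.or_assoc]

-- 'any' distributes over a pointwise disjunction
lemma pv_any_or {α : Type} (l : List α) (p q : α → Bool) :
    (l.any fun x => p x || q x) = (l.any p || l.any q) := by
  induction l with
  | nil => rfl
  | cons x xs ih => simp [List.any_cons, ih, Bool.or_assoc, Bool.or_left_comm]

-- a nonempty pattern occurs as a substring iff it is a prefix of some suffix cut inside the text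
lemma pv_scan_eq_isIn (cs kw : List Char) (h : kw ≠ []) :
    (List.range cs.length).any (fun i => PySem.Chars.startswith (cs.drop i) kw)
      = PySem.Chars.isIn kw cs := by
  rcases hb : PySem.Chars.isIn kw cs with _ | _
  · simp only [List.any_eq_false, List.mem_range]
    intro i _
    by_contra hp
    rw [PySem.Chars.startswith_iff] at hp
    have ht : PySem.Chars.isIn kw cs = true :=
      (PySem.Chars.exists_prefix_drop_iff_isIn kw cs).mp ⟨i, hp⟩
    rw [hb] at ht; exact Bool.false_ne_true ht
  · obtain ⟨j, hj⟩ := (PySem.Chars.exists_prefix_drop_iff_isIn kw cs).mpr hb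
    have hjlt : j < cs.length := by
      by_contra hge
      rw [List.drop_eq_nil_of_le (Nat.le_of_not_lt hge)] at hj
      exact h (List.prefix_nil.mp hj)
    simp only [List.any_eq_true, List.mem_range]
    exact ⟨j, hjlt, (PySem.Chars.startswith_iff _ _).mpr hj⟩

-- the position scan of a group of nonempty keywords equals the per-keyword substring tests
lemma pv_group_scan (cs : List Char) (kws : List String) (h : ∀ kw ∈ kws, kw.toList ≠ []) :
    (List.range cs.length).any (fun i => pvStartsGroup cs i kws)
      = kws.any (fun kw => PySem.Chars.isIn kw.toList cs) := by
  induction kws with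
  | nil => simp [pvStartsGroup]
  | cons k ks ih =>
    have hrec := ih (fun kw hm => h kw (List.mem_cons_of_mem _ hm))
    simp only [pvStartsGroup, List.any_cons] at *
    rw [pv_any_or, hrec, pv_scan_eq_isIn cs k.toList (h k List.mem_cons_self)]

theorem generate_fallback_variants_spec : Claim_equal_generate_fallback_variants := by
  intro pd _
  unfold Spec_generate_fallback_variants generate_fallback_variants generate_fallback_variants_alt
  simp only [pv_foldl_or3, Bool.false_or, List.map, List.nil_append, List.singleton_append]
  rw [pv_group_scan _ _ (by decide), pv_group_scan _ _ (by decide), pv_group_scan _ _ (by decide)]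
  simp only [PySem.Str.isIn_eq]
  split_ifs <;> rfl
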